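-- pv_equiv track=rewrite | github.com/thulab/IginX | python_scripts/udf_max.py | transform
-- ===== SOURCE A (Python) =====
-- def transform(rows):
--     res = []
--     for row in zip(*rows):
--         max = None
--         for num in row:
--             if num is not None:
--                 if max is None:
--                     max = num
--                 elif max < num:
--                     max = num
--         res.append(max)
--     return res
-- ===== SOURCE B (Python) =====
-- def transform(rows):
--     if not rows:
--         return []
--     n = min(map(len, rows))
--     res = [None] * n
--     for row in rows:
--         res = [v if v is not None and (u is None or u < v) else u
--                for u, v in zip(res, row)]
--     return res
-- ===== Notes on version B (the rewrite author's own statement) =====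
-- stated objective: alternative
-- what changed: B streams the rows once, maintaining a running per-column maximum vector of width min(len(r)), instead of materializing the transpose with zip(*rows) and scanning each column.
import Mathlib
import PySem

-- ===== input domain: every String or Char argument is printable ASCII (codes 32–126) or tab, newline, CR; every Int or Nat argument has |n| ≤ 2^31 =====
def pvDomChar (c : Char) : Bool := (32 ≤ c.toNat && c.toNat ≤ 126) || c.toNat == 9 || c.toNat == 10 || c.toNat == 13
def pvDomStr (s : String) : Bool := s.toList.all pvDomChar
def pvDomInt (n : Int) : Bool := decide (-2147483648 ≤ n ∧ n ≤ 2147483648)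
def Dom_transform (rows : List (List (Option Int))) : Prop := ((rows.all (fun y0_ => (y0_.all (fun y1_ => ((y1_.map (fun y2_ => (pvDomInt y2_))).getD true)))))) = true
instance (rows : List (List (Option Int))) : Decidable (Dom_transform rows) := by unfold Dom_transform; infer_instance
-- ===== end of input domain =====

-- B streams the rows once, maintaining a running per-column maximum vector of width
-- min(len(r)), instead of materializing the transpose with zip(*rows) and scanning
-- each column (objective: alternative decomposition, same cost).

-- ===== PORT A =====
-- A's inner loop body: running max ignoring None, strict '<' so ties keep the first seen
def pvStepA (m : Option Int) (num : Option Int) : Option Int :=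
  match num with
  | none => m
  | some v =>
    match m with
    | none => some v
    | some u => if u < v then some v else some u

-- zip(*rows): transpose truncated to the shortest row (zip() with no args yields nothing)
def pvZipStar (rows : List (List (Option Int))) : List (List (Option Int)) :=
  if _h : rows = [] ∨ rows.any (·.isEmpty) then []
  else (rows.map (·.headI)) :: pvZipStar (rows.map (·.tail))
termination_by rows.headI.length
decreasing_by
  simp only [not_or] at _h
  obtain ⟨hne, hemp⟩ := _h
  cases rows with
  | nil => exact absurd rfl hne
  | cons r rs =>
    have hr : r ≠ [] := by
      intro hre
      exact hemp (by simp [hre])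
    simp only [List.headI]
    cases r with
    | nil => exact absurd rfl hr
    | cons a t => simp

def transform (rows : List (List (Option Int))) : List (Option Int) :=
  (pvZipStar rows).map (fun col => col.foldl pvStepA none)

-- ===== PORT B =====
-- B's update: `v if v is not None and (u is None or u < v) else u`
def pvUpd (u v : Option Int) : Option Int :=
  match v with
  | none => u
  | some x =>
    match u with
    | none => some x
    | some y => if y < x then some x else u

def transform_alt (rows : List (List (Option Int))) : List (Option Int) :=
  if rows.isEmpty then []
  else
    let n := ((rows.map List.length).min?).getD 0
    rows.foldl (fun res row => List.zipWith pvUpd res row) (List.replicate n none)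

-- ===== PRECONDITION & SPEC =====
def Spec_transform (rows : List (List (Option Int))) (out : List (Option Int)) : Prop := out = transform_alt rows
instance (rows : List (List (Option Int))) (out : List (Option Int)) : Decidable (Spec_transform rows out) := by unfold Spec_transform; infer_instance

-- ===== CLAIM (what is proved, stated in full; the proofs are below) =====
def Claim_equal_transform : Prop := ∀ (rows : List (List (Option Int))), Dom_transform rows → Spec_transform rows (transform rows)

-- ===== LEMMAS AND PROOFS =====
def pvMinLen (rows : List (List (Option Int))) : Nat := ((rows.map List.length).min?).getD 0

theorem pvUpd_eq_stepA (u v : Option Int) : pvUpd u v = pvStepA u v := by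
  cases u <;> cases v <;> rfl

theorem pvMinLen_spec (rows : List (List (Option Int))) (hne : rows ≠ []) :
    (∃ r ∈ rows, pvMinLen rows = r.length) ∧ ∀ r ∈ rows, pvMinLen rows ≤ r.length := by
  cases hm : (rows.map List.length).min? with
  | none =>
    rw [List.min?_eq_none_iff] at hm
    exact absurd (List.map_eq_nil_iff.mp hm) hne
  | some m =>
    obtain ⟨hmem, hle⟩ := List.min?_eq_some_iff.mp hm
    obtain ⟨r, hr, hrl⟩ := List.mem_map.mp hmem
    have hml : pvMinLen rows = m := by simp [pvMinLen, hm]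
    constructor
    · exact ⟨r, hr, by omega⟩
    · intro s hs
      have := hle s.length (List.mem_map.mpr ⟨s, hs, rfl⟩)
      omega

theorem pvMinLen_le (rows : List (List (Option Int))) (r : List (Option Int)) (h : r ∈ rows) :
    pvMinLen rows ≤ r.length :=
  (pvMinLen_spec rows (by rintro rfl; cases h)).2 r h

theorem pvMinLen_pos (rows : List (List (Option Int))) (hne : rows ≠ [])
    (hall : ∀ r ∈ rows, r ≠ []) : 1 ≤ pvMinLen rows := by
  obtain ⟨⟨r, hr, hrl⟩, -⟩ := pvMinLen_spec rows hne
  have := hall r hr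

  cases r with
  | nil => exact absurd rfl this
  | cons a t => simp [hrl]

theorem pvMinLen_tail (rows : List (List (Option Int))) (hne : rows ≠ [])
    (_hall : ∀ r ∈ rows, r ≠ []) :
    pvMinLen (rows.map (·.tail)) = pvMinLen rows - 1 := by
  have hne' : rows.map (·.tail) ≠ [] := by simpa using hne
  obtain ⟨⟨r, hr, hrl⟩, hle⟩ := pvMinLen_spec rows hne
  obtain ⟨⟨t, ht, htl⟩, hle'⟩ := pvMinLen_spec (rows.map (·.tail)) hne'
  obtain ⟨s, hs, rfl⟩ := List.mem_map.mp ht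
  have h1 : pvMinLen (rows.map (·.tail)) ≤ r.tail.length :=
    hle' r.tail (List.mem_map.mpr ⟨r, hr, rfl⟩)
  have h2 : pvMinLen rows ≤ s.length := hle s hs
  have h3 : r.tail.length = r.length - 1 := by simp
  have h4 : s.tail.length = s.length - 1 := by simp
  omega

theorem pvZipStar_eq_aux (n : Nat) :
    ∀ rows : List (List (Option Int)), pvMinLen rows = n →
      pvZipStar rows = (List.range n).map (fun i => rows.map (fun r => r.getD i none)) := by
  induction n with
  | zero =>
    intro rows hn
    rw [pvZipStar]
    split
    · rfl
    · rename_i h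
      simp only [not_or] at h
      obtain ⟨hne, hemp⟩ := h
      have hall : ∀ r ∈ rows, r ≠ [] := by
        intro r hr hre
        exact hemp (by simp only [List.any_eq_true]; exact ⟨r, hr, by simp [hre]⟩)
      have := pvMinLen_pos rows hne hall
      omega
  | succ k ih =>
    intro rows hn
    rw [pvZipStar]
    split
    · rename_i h
      rcases h with rfl | h
      · simp [pvMinLen] at hn
      · simp only [List.any_eq_true] at h
        obtain ⟨r, hr, he⟩ := h
        have h1 := pvMinLen_le rows r hr
        have h2 : r.length = 0 := by simpa [List.isEmpty_iff_length_eq_zero] using he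
        omega
    · rename_i h
      simp only [not_or] at h
      obtain ⟨hne, hemp⟩ := h
      have hall : ∀ r ∈ rows, r ≠ [] := by
        intro r hr hre
        exact hemp (by simp only [List.any_eq_true]; exact ⟨r, hr, by simp [hre]⟩)
      have htail : pvMinLen (rows.map (·.tail)) = k := by
        rw [pvMinLen_tail rows hne hall, hn]
        omega
      rw [ih _ htail, List.range_succ_eq_map, List.map_cons, List.map_map]
      congr 1
      · apply List.map_congr_left
        intro r hr
        have := hall r hr
        cases r with
        | nil => exact absurd rfl this
        | cons a t => rfl
      · apply List.map_congr_left
        intro i _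
        simp only [Function.comp, List.map_map]
        apply List.map_congr_left
        intro r hr
        have := hall r hr
        cases r with
        | nil => exact absurd rfl this
        | cons a t => rfl

theorem pvZipStar_eq (rows : List (List (Option Int))) :
    pvZipStar rows
      = (List.range (pvMinLen rows)).map (fun i => rows.map (fun r => r.getD i none)) :=
  pvZipStar_eq_aux (pvMinLen rows) rows rfl

theorem range_map_getD (l : List (Option Int)) :
    (List.range l.length).map (fun i => l.getD i none) = l := by
  induction l with
  | nil => rfl
  | cons a t ih =>
    rw [List.length_cons, List.range_succ_eq_map, List.map_cons, List.map_map]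
    simp only [List.getD_cons_zero]
    refine congrArg (a :: ·) ?_
    simpa [Function.comp] using ih

theorem getD_zipWith (res row : List (Option Int)) (i : Nat)
    (h1 : i < res.length) (h2 : i < row.length) :
    (List.zipWith pvUpd res row).getD i none = pvUpd (res.getD i none) (row.getD i none) := by
  have hl : i < (List.zipWith pvUpd res row).length := by simp; omega
  rw [List.getD_eq_getElem _ _ hl, List.getD_eq_getElem _ _ h1, List.getD_eq_getElem _ _ h2,
      List.getElem_zipWith]

theorem foldB_eq (rows : List (List (Option Int))) (res : List (Option Int))
    (h : ∀ r ∈ rows, res.length ≤ r.length) :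
    rows.foldl (fun res row => List.zipWith pvUpd res row) res
      = (List.range res.length).map
          (fun i => rows.foldl (fun m r => pvUpd m (r.getD i none)) (res.getD i none)) := by
  induction rows generalizing res with
  | nil => rw [List.foldl_nil]; exact (range_map_getD res).symm
  | cons row rest ih =>
    simp only [List.foldl_cons]
    have hrow : res.length ≤ row.length := h row (by simp)
    have hlen : (List.zipWith pvUpd res row).length = res.length := by simp; omega
    rw [ih _ (by intro r hr; rw [hlen]; exact h r (by simp [hr])), hlen]
    apply List.map_congr_left
    intro i hi
    rw [List.mem_range] at hi
    rw [getD_zipWith res row i hi (by omega)]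

theorem foldl_upd_eq_stepA (rows : List (List (Option Int))) (i : Nat) (acc : Option Int) :
    rows.foldl (fun m r => pvUpd m (r.getD i none)) acc
      = rows.foldl (fun m r => pvStepA m (r.getD i none)) acc := by
  induction rows generalizing acc with
  | nil => rfl
  | cons r rs ih => rw [List.foldl_cons, List.foldl_cons, pvUpd_eq_stepA, ih]

theorem transform_eq_range (rows : List (List (Option Int))) :
    transform rows = (List.range (pvMinLen rows)).map
      (fun i => rows.foldl (fun m r => pvStepA m (r.getD i none)) none) := by
  rw [transform, pvZipStar_eq, List.map_map]
  apply List.map_congr_left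
  intro i _
  simp [Function.comp, List.foldl_map]

-- ===== VERDICT (by name: the statement is the Claim_ definition above) =====
theorem transform_spec : Claim_equal_transform := by
  intro rows _
  unfold Spec_transform transform_alt
  cases rows with
  | nil => simp [transform, pvZipStar]
  | cons x xs =>
    rw [if_neg (by simp)]
    rw [show (((x :: xs).map List.length).min?).getD 0 = pvMinLen (x :: xs) from rfl]
    rw [foldB_eq _ _ (by intro r hr; simpa using pvMinLen_le _ r hr)]
    rw [List.length_replicate, transform_eq_range]
    apply List.map_congr_left
    intro i hi
    rw [List.mem_range] at hi
    have hrep : (List.replicate (pvMinLen (x :: xs)) (none : Option Int)).getD i none = none := by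
      rw [List.getD_eq_getElem _ _ (by simpa using hi)]
      simp
    rw [hrep, foldl_upd_eq_stepA]
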